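-- pv_equiv track=rewrite | github.com/bbang-jun/KW-CodingTest-Study | CT-DongbinNa/MinCheol/PART03/CT_06.py | solution
-- ===== SOURCE A (Python) =====
-- def solution(food_times, k):
--     answer = 0
--     Finished = 0
--     Length = len(food_times)
--     A = 0
--
--     while Finished != Length :
--         if A == Length: #select the dish to first
--             A=0
--         if food_times[A]==0: #check if food time is 0
--             A+=1
--             continue
--
--         answer = A + 1
--         if k<=0:
--             break
--
--         food_times[A]-=1
--         if food_times[A]==0:
--             Finished+=1
--         k-=1
--         A+=1
--
--     if Finished==Length:
--         answer = -1
--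
--     return answer
-- ===== SOURCE B (Python) =====
-- def solution(food_times, k):
--     # Bulk round-robin: the dishes rotate, one second each; a dish leaves the
--     # queue when its counter reaches exactly zero.  Instead of simulating one
--     # second at a time, jump ahead whole rounds: the next departure happens
--     # after min(positive counters) full rounds.  (Does not mutate food_times.)
--     active = [(i, t) for i, t in enumerate(food_times) if t]
--     while active:
--         pos = [t for _, t in active if t > 0]
--         if not pos:  # no counter will ever reach zero: the queue is permanent
--             break
--         m = min(pos)  # full rounds until the next dish leaves
--         if k < m * len(active):
--             break
--         k -= m * len(active)
--         active = [(i, t - m) for i, t in active if t != m]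
--     if not active:
--         return -1
--     return active[k % len(active)][0] + 1
-- ===== Notes on version B (the rewrite author's own statement) =====
-- stated objective: alternative
-- what changed: B replaces A's second-by-second round-robin simulation by bulk round arithmetic: it jumps min(positive counters) whole rounds at a time and finally indexes the remaining queue with k mod its length; Pre_ requires k >= 0 (negative seconds are outside the natural domain) and excludes the inputs where A's loop never returns (a zero entry with all entries nonnegative and k >= their sum).
-- outside the precondition, e.g. on solution([2, 3], -5): A returns 1, B returns 2; on solution([0], 5): A does not finish within the time limit, B returns -1
import Mathlib
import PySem

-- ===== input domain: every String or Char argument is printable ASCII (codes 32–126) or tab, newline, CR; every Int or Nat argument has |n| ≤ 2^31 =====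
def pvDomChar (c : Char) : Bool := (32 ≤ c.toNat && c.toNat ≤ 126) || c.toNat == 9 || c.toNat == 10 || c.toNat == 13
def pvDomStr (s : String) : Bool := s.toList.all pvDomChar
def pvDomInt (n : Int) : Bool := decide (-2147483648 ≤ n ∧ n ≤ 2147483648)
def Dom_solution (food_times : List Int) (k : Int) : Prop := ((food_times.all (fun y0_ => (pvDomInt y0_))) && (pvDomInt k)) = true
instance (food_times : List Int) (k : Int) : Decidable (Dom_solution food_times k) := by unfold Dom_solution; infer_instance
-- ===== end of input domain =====

-- B replaces A's second-by-second round-robin simulation with bulk round arithmetic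
-- (jump min(positive counters) whole rounds at once, then index with k mod the queue
-- length).  A mutates food_times in place; B does not — the equivalence proved here
-- is about the RETURN value only.

-- ===== PORT A =====
-- A's while-loop, one recursive call per iteration; the fuel argument is only a
-- termination guard (under Pre_solution the loop runs fewer iterations than the fuel).
def loopA : Nat → List Int → Int → Int → Int → Int → Int
  | 0, _, _, ans, _, _ => ans
  | fuel + 1, ft, k, ans, A, Fin =>
    if Fin = (ft.length : Int) then -1
    else
      let A1 : Int := if A = (ft.length : Int) then 0 else A
      match PySem.List.pyGet? ft A1 with
      | none => 0
      | some v =>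
        if v = 0 then loopA fuel ft k ans (A1 + 1) Fin
        else if k ≤ 0 then (if Fin = (ft.length : Int) then -1 else A1 + 1)
        else loopA fuel (PySem.List.pySetD ft A1 (v - 1)) (k - 1) (A1 + 1) (A1 + 1)
               (if v - 1 = 0 then Fin + 1 else Fin)

def solution (food_times : List Int) (k : Int) : Int :=
  loopA (((max k 0).toNat + 1) * (2 * food_times.length + 2) + 1) food_times k 0 0 0

-- ===== PORT B =====
-- Source B's while-loop: one recursive call per iteration, active strictly shrinks
def altLoop (active : List (Int × Int)) (k : Int) : (List (Int × Int)) × Int :=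
  if _h : active = [] then (active, k)
  else
    let pos := (active.map Prod.snd).filter (fun t => decide (0 < t))
    if _hp : pos = [] then (active, k)
    else
      match hm : PySem.List.min? pos (fun t => t) with
      | none => (active, k)
      | some m =>
        if k < m * (active.length : Int) then (active, k)
        else
          altLoop ((active.filter (fun p => decide (p.2 ≠ m))).map (fun p => (p.1, p.2 - m)))
            (k - m * (active.length : Int))
termination_by active.length
decreasing_by
  have hmp := PySem.List.min?_mem hm
  obtain ⟨⟨p0, hp0⟩, -, hp0m⟩ := List.mem_map.mp (List.mem_of_mem_filter hmp)
  simp only [List.length_map, ← List.countP_eq_length_filter]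
  have hlt : (active.filter (fun p => decide (p.2 ≠ m))).length < active.length :=
    List.length_filter_lt_length_iff_exists.mpr ⟨p0, hp0, by simp [hp0m]⟩
  rw [← List.countP_eq_length_filter] at hlt
  exact lt_of_eq_of_lt (@List.countP_attach _ active (fun p => decide (p.2 ≠ m))) hlt

-- Source B's code after the loop ('if not active: return -1 / return active[k % len] ...')
def postIdx (active : List (Int × Int)) (k' : Int) : Int :=
  if active = [] then -1
  else
    match PySem.List.pyGet? active (PySem.Int.mod k' (active.length : Int)) with
    | some p => p.1 + 1
    | none => 0

def solution_alt (food_times : List Int) (k : Int) : Int :=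
  match altLoop ((PySem.List.enumerate food_times 0).filter (fun p => decide (p.2 ≠ 0))) k with
  | (active, k') => postIdx active k'

-- ===== PRECONDITION & SPEC =====
-- Pre_solution requires a nonnegative k (negative seconds are outside the problem's
-- natural domain; A's value there is an accident of its per-second loop) and excludes
-- exactly the inputs on which A never returns: its while-loop runs forever when a zero
-- entry is present, every entry is nonnegative, and k is at least the total eating
-- time (a zero entry is never counted as finished).
def Pre_solution (food_times : List Int) (k : Int) : Prop :=
  0 ≤ k ∧ ¬((0 : Int) ∈ food_times ∧ (∀ x ∈ food_times, 0 ≤ x) ∧ food_times.sum ≤ k)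
instance (food_times : List Int) (k : Int) : Decidable (Pre_solution food_times k) := by
  unfold Pre_solution; infer_instance

def pvWitness_solution : List Int × Int := ([3, 1, 2], 5)

def Spec_solution (food_times : List Int) (k : Int) (out : Int) : Prop := out = solution_alt food_times k
instance (food_times : List Int) (k : Int) (out : Int) : Decidable (Spec_solution food_times k out) := by unfold Spec_solution; infer_instance

-- ===== CLAIM (what is proved, stated in full; the proofs are below) =====
def Claim_equal_solution : Prop := ∀ (food_times : List Int) (k : Int), Dom_solution food_times k → Pre_solution food_times k → Spec_solution food_times k (solution food_times k)

-- ===== LEMMAS AND PROOFS =====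

def filt (p : Int × Int) : List (Int × Int) :=
  if p.2 - 1 = 0 then [] else [(p.1, p.2 - 1)]

def ref2 : Nat → List (Int × Int) → Int
  | _, [] => -1
  | 0, p :: _ => p.1 + 1
  | q + 1, p :: rest => ref2 q (rest ++ filt p)

def apF : Int → List Int → List (Int × Int)
  | _, [] => []
  | s, v :: r => (if v = 0 then [] else [(s, v)]) ++ apF (s + 1) r

def rotQ (ft : List Int) (A : Int) : List (Int × Int) :=
  (apF 0 ft).filter (fun p => decide (A ≤ p.1)) ++ (apF 0 ft).filter (fun p => decide (p.1 < A))

theorem mem_apF : ∀ (l : List Int) (s : Int) (p : Int × Int),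
    p ∈ apF s l ↔ ∃ j : Nat, p.1 = s + j ∧ l[j]? = some p.2 ∧ p.2 ≠ 0
  | [], s, p => by simp [apF]
  | v :: r, s, p => by
    simp only [apF, List.mem_append]
    rw [mem_apF r (s + 1) p]
    constructor
    · rintro (h1 | ⟨j, hj1, hj2, hj3⟩)
      · by_cases hv : v = 0
        · simp [hv] at h1
        · simp [hv] at h1
          exact ⟨0, by simp [h1, hv]⟩
      · exact ⟨j + 1, by push_cast; omega, by simpa using hj2, hj3⟩
    · rintro ⟨j, hj1, hj2, hj3⟩
      cases j with
      | zero =>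
        left
        simp at hj2 hj1
        have : p = (s, v) := by cases p; simp_all
        simp [this, hj2 ▸ hj3]
      | succ j =>
        right
        refine ⟨j, by push_cast at hj1 ⊢; omega, by simpa using hj2, hj3⟩

theorem apF_lb {l : List Int} {s : Int} {p : Int × Int} (h : p ∈ apF s l) : s ≤ p.1 := by
  obtain ⟨j, h1, _, _⟩ := (mem_apF l s p).mp h; omega

theorem apF_ub {l : List Int} {s : Int} {p : Int × Int} (h : p ∈ apF s l) :
    p.1 < s + l.length := by
  obtain ⟨j, h1, h2, _⟩ := (mem_apF l s p).mp h
  obtain ⟨hlt, -⟩ := List.getElem?_eq_some_iff.mp h2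
  omega

theorem apF_snd_ne {l : List Int} {s : Int} {p : Int × Int} (h : p ∈ apF s l) : p.2 ≠ 0 := by
  obtain ⟨j, _, _, h3⟩ := (mem_apF l s p).mp h; exact h3

theorem apF_append : ∀ (s : Int) (l1 l2 : List Int),
    apF s (l1 ++ l2) = apF s l1 ++ apF (s + l1.length) l2
  | s, [], l2 => by simp [apF]
  | s, v :: r, l2 => by
    simp only [List.cons_append, apF, apF_append (s + 1) r l2, List.append_assoc,
      List.length_cons]
    congr 2
    push_cast; ring_nf

theorem apF_nil_of_all_zero : ∀ {l : List Int} (s : Int), (∀ x ∈ l, x = 0) → apF s l = []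
  | [], _, _ => rfl
  | v :: r, s, h => by
    have hr : apF (s + 1) r = [] :=
      apF_nil_of_all_zero (s + 1) (fun x hx => h x (List.mem_cons_of_mem v hx))
    simp [apF, h v List.mem_cons_self, hr]

theorem rotQ_zero (ft : List Int) : rotQ ft 0 = apF 0 ft := by
  unfold rotQ
  rw [List.filter_eq_self.mpr (fun p hp => by simpa using apF_lb hp),
    List.filter_eq_nil_iff.mpr (fun p hp => by simpa using apF_lb hp), List.append_nil]

theorem rotQ_len (ft : List Int) : rotQ ft (ft.length : Int) = apF 0 ft := by
  unfold rotQ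
  rw [List.filter_eq_nil_iff.mpr (fun p hp => by simpa using apF_ub hp),
    List.filter_eq_self.mpr (fun p hp => by simpa using apF_ub hp), List.nil_append]

theorem ne_idx_of_zero {ft : List Int} {i : Nat} (h : ft[i]? = some 0) {p : Int × Int}
    (hp : p ∈ apF 0 ft) : p.1 ≠ (i : Int) := by
  obtain ⟨j, h1, h2, h3⟩ := (mem_apF ft 0 p).mp hp
  intro hc
  have hji : j = i := by omega
  rw [hji, h] at h2
  exact h3 (by simpa using h2.symm)

theorem rotQ_skip (ft : List Int) (i : Nat) (h : ft[i]? = some 0) :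
    rotQ ft (i : Int) = rotQ ft ((i : Int) + 1) := by
  have f1 : (apF 0 ft).filter (fun p => decide ((i : Int) ≤ p.1)) =
      (apF 0 ft).filter (fun p => decide ((i : Int) + 1 ≤ p.1)) :=
    List.filter_congr (fun p hp => decide_eq_decide.mpr (by have := ne_idx_of_zero h hp; omega))
  have f2 : (apF 0 ft).filter (fun p => decide (p.1 < (i : Int))) =
      (apF 0 ft).filter (fun p => decide (p.1 < (i : Int) + 1)) :=
    List.filter_congr (fun p hp => decide_eq_decide.mpr (by have := ne_idx_of_zero h hp; omega))
  unfold rotQ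
  rw [f1, f2]

theorem apF_decomp (ft : List Int) (j : Nat) (v : Int) (h : ft[j]? = some v) :
    apF 0 ft = apF 0 (ft.take j) ++
      (if v = 0 then [] else [((j : Int), v)]) ++ apF ((j : Int) + 1) (ft.drop (j + 1)) := by
  obtain ⟨hlt, hv⟩ := List.getElem?_eq_some_iff.mp h
  conv_lhs => rw [show ft = ft.take j ++ ft[j] :: ft.drop (j + 1) from
    (List.getElem_cons_drop hlt ▸ (List.take_append_drop j ft).symm)]
  rw [apF_append, hv]
  have hlen : ((ft.take j).length : Int) = (j : Int) := by
    simp [List.length_take, Nat.min_eq_left (Nat.le_of_lt hlt)]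
  simp only [apF, zero_add, hlen, List.append_assoc]

theorem take_len_int {ft : List Int} {j : Nat} (hlt : j < ft.length) :
    (((ft.take j).length : Nat) : Int) = (j : Int) := by
  simp [List.length_take, Nat.min_eq_left (Nat.le_of_lt hlt)]

theorem rotQ_active (ft : List Int) (j : Nat) (v : Int) (h : ft[j]? = some v) (hv : v ≠ 0) :
    rotQ ft (j : Int) =
      ((j : Int), v) :: (apF ((j : Int) + 1) (ft.drop (j + 1)) ++ apF 0 (ft.take j)) := by
  obtain ⟨hlt, -⟩ := List.getElem?_eq_some_iff.mp h
  have e1 : (apF 0 (ft.take j)).filter (fun p => decide ((j : Int) ≤ p.1)) = [] :=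
    List.filter_eq_nil_iff.mpr (fun p hp => by
      have h2 := apF_ub hp; rw [zero_add, take_len_int hlt] at h2; simpa using by omega)
  have e2 : (apF ((j : Int) + 1) (ft.drop (j + 1))).filter
      (fun p => decide ((j : Int) ≤ p.1)) = apF ((j : Int) + 1) (ft.drop (j + 1)) :=
    List.filter_eq_self.mpr (fun p hp => by have := apF_lb hp; simpa using by omega)
  have e3 : (apF 0 (ft.take j)).filter (fun p => decide (p.1 < (j : Int))) =
      apF 0 (ft.take j) :=
    List.filter_eq_self.mpr (fun p hp => by
      have h2 := apF_ub hp; rw [zero_add, take_len_int hlt] at h2; simpa using by omega)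
  have e4 : (apF ((j : Int) + 1) (ft.drop (j + 1))).filter
      (fun p => decide (p.1 < (j : Int))) = [] :=
    List.filter_eq_nil_iff.mpr (fun p hp => by have := apF_lb hp; simpa using by omega)
  unfold rotQ
  rw [apF_decomp ft j v h, if_neg hv]
  simp only [List.filter_append, e1, e2, e3, e4, List.filter_cons]
  simp

theorem rotQ_eat (ft : List Int) (j : Nat) (v : Int) (h : ft[j]? = some v) (hv : v ≠ 0) :
    rotQ (ft.set j (v - 1)) ((j : Int) + 1) =
      (apF ((j : Int) + 1) (ft.drop (j + 1)) ++ apF 0 (ft.take j)) ++ filt ((j : Int), v) := by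
  obtain ⟨hlt, -⟩ := List.getElem?_eq_some_iff.mp h
  have hset : (ft.set j (v - 1))[j]? = some (v - 1) := by
    rw [List.getElem?_set_self']
    simp [List.getElem?_eq_some_iff.mpr ⟨hlt, rfl⟩]
  have htk : (ft.set j (v - 1)).take j = ft.take j := by
    rw [List.take_set_of_le (le_refl j)]
  have hdp : (ft.set j (v - 1)).drop (j + 1) = ft.drop (j + 1) := by
    rw [List.drop_set_of_lt (by omega)]
  have e1 : (apF 0 (ft.take j)).filter (fun p => decide ((j : Int) + 1 ≤ p.1)) = [] :=
    List.filter_eq_nil_iff.mpr (fun p hp => by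
      have h2 := apF_ub hp; rw [zero_add, take_len_int hlt] at h2; simpa using by omega)
  have e2 : (apF ((j : Int) + 1) (ft.drop (j + 1))).filter
      (fun p => decide ((j : Int) + 1 ≤ p.1)) = apF ((j : Int) + 1) (ft.drop (j + 1)) :=
    List.filter_eq_self.mpr (fun p hp => by have := apF_lb hp; simpa using by omega)
  have e3 : (apF 0 (ft.take j)).filter (fun p => decide (p.1 < (j : Int) + 1)) =
      apF 0 (ft.take j) :=
    List.filter_eq_self.mpr (fun p hp => by
      have h2 := apF_ub hp; rw [zero_add, take_len_int hlt] at h2; simpa using by omega)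
  have e4 : (apF ((j : Int) + 1) (ft.drop (j + 1))).filter
      (fun p => decide (p.1 < (j : Int) + 1)) = [] :=
    List.filter_eq_nil_iff.mpr (fun p hp => by have := apF_lb hp; simpa using by omega)
  unfold rotQ
  rw [apF_decomp (ft.set j (v - 1)) j (v - 1) hset, htk, hdp]
  simp only [List.filter_append, e1, e2, e3, e4]
  by_cases hv1 : v - 1 = 0 <;>
    simp [filt, hv1, List.append_assoc]

def cz (l : List Int) : Nat := (l.filter (fun x => decide (x = 0))).length

def InvA (Z : Nat) (ft : List Int) (k Fin : Int) : Prop :=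
  Fin = (cz ft : Int) - Z ∧ Z ≤ cz ft ∧ 0 ≤ k ∧
    (0 < Z → ((∃ x ∈ ft, x < 0) ∨ k < ft.sum))

theorem sum_set_int (l : List Int) (i : Nat) (a : Int) (h : i < l.length) :
    (l.set i a).sum = l.sum - l[i] + a := by
  have h2 : (l.take i).sum + (l[i] :: l.drop (i + 1)).sum = l.sum := by
    rw [← List.sum_append, List.getElem_cons_drop h, List.take_append_drop]
  rw [List.sum_cons] at h2
  rw [List.set_eq_take_cons_drop a h, List.sum_append, List.sum_cons]; omega

theorem cz_append (l1 l2 : List Int) : cz (l1 ++ l2) = cz l1 + cz l2 := by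
  simp [cz, List.filter_append]

theorem cz_set (l : List Int) (i : Nat) (a : Int) (h : i < l.length) (hv : l[i] ≠ 0) :
    cz (l.set i a) = cz l + (if a = 0 then 1 else 0) := by
  have h2 : l = l.take i ++ l[i] :: l.drop (i + 1) :=
    (List.getElem_cons_drop h ▸ (List.take_append_drop i l).symm)
  rw [List.set_eq_take_cons_drop a h]
  conv_rhs => rw [h2]
  rw [cz_append, cz_append]
  simp only [cz, List.filter_cons]
  by_cases ha : a = 0 <;> simp [ha, hv] <;> omega

theorem cz_le (l : List Int) : cz l ≤ l.length := List.length_filter_le _ _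

theorem InvA_exit {Z : Nat} {ft : List Int} {k Fin : Int} (h : InvA Z ft k Fin)
    (hf : Fin = (ft.length : Int)) : ∀ x ∈ ft, x = 0 := by
  obtain ⟨h2, h3, -, -⟩ := h
  have hle := cz_le ft
  have hcz : cz ft = ft.length := by omega
  intro x hx
  have := List.length_filter_eq_length_iff.mp hcz x hx
  simpa using this

theorem InvA_live {Z : Nat} {ft : List Int} {k Fin : Int} (h : InvA Z ft k Fin)
    (hf : Fin ≠ (ft.length : Int)) : ∃ j : Nat, ∃ v, ft[j]? = some v ∧ v ≠ 0 := by
  by_contra hc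
  push_neg at hc
  have hall : ∀ x ∈ ft, x = 0 := by
    intro x hx
    obtain ⟨j, hj⟩ := List.getElem?_of_mem hx
    exact hc j x hj
  obtain ⟨h2, h3, h4, h5⟩ := h
  have hcz : cz ft = ft.length := by
    rw [cz, List.filter_eq_self.mpr (fun x hx => by simp [hall x hx])]
  have hZ : 0 < Z := by omega
  rcases h5 hZ with ⟨x, hx, hneg⟩ | hsum
  · have := hall x hx; omega
  · rw [List.sum_eq_zero hall] at hsum; omega

theorem InvA_eat {Z : Nat} {ft : List Int} {k Fin : Int} (h : InvA Z ft k Fin)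
    (j : Nat) (v : Int) (hj : ft[j]? = some v) (hv : v ≠ 0) (hk : 0 < k) :
    InvA Z (ft.set j (v - 1)) (k - 1) (if v - 1 = 0 then Fin + 1 else Fin) := by
  obtain ⟨hlt, hgv⟩ := List.getElem?_eq_some_iff.mp hj
  obtain ⟨h2, h3, h4, h5⟩ := h
  have hcz : cz (ft.set j (v - 1)) = cz ft + (if v - 1 = 0 then 1 else 0) :=
    cz_set ft j (v - 1) hlt (by rw [hgv]; exact hv)
  have hsum : (ft.set j (v - 1)).sum = ft.sum - 1 := by
    rw [sum_set_int ft j (v - 1) hlt, hgv]; ring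
  refine ⟨?_, ?_, by omega, ?_⟩
  · rw [hcz]; by_cases hv1 : v - 1 = 0 <;> simp [hv1] <;> omega
  · omega
  · intro hZ
    rcases h5 hZ with ⟨x, hx, hneg⟩ | hsum'
    · left
      by_cases hvneg : v < 0
      · refine ⟨v - 1, ?_, by omega⟩
        have hg : (ft.set j (v - 1))[j]'(by rw [List.length_set]; exact hlt) = v - 1 :=
          List.getElem_set_self _
        exact List.mem_of_getElem hg
      · obtain ⟨i, hi, hix⟩ := List.getElem_of_mem hx
        have hij : i ≠ j := by
          intro hc; subst hc
          have hxv : x = v := by rw [← hix]; exact hgv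
          omega
        refine ⟨x, ?_, hneg⟩
        have hg : (ft.set j (v - 1))[i]'(by rw [List.length_set]; exact hi) = x := by
          rw [List.getElem_set_ne (by omega)]; exact hix
        exact List.mem_of_getElem hg
    · right; omega

theorem loopA_wrap (f : Nat) (ft : List Int) (k ans Fin : Int) :
    loopA (f + 1) ft k ans (ft.length : Int) Fin = loopA (f + 1) ft k ans 0 Fin := by
  by_cases h0 : ft.length = 0
  · simp [h0]
  · simp only [loopA, if_true, ite_self]

theorem ref2_nil (q : Nat) : ref2 q [] = -1 := by cases q <;> rfl

theorem mainA : ∀ (K Z : Nat) (ft : List Int) (k ans Fin : Int) (A fuel : Nat),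
    InvA Z ft k Fin → A ≤ ft.length → K = k.toNat →
    (K + 1) * (2 * ft.length + 2) + 1 ≤ fuel →
    loopA fuel ft k ans (A : Int) Fin = ref2 K (rotQ ft (A : Int)) := by
  intro K
  induction K using Nat.strong_induction_on with
  | _ K IH =>
  intro Z ft k ans Fin A fuel hInv hA hK hfuel
  obtain ⟨X, hX⟩ : ∃ X, X = K * (2 * ft.length + 2) := ⟨_, rfl⟩
  have hfuelX : X + 2 * ft.length + 2 + 1 ≤ fuel := by
    have : (K + 1) * (2 * ft.length + 2) = K * (2 * ft.length + 2) + (2 * ft.length + 2) := by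
      ring
    rw [this, ← hX] at hfuel; omega
  by_cases hFin : Fin = (ft.length : Int)
  · obtain ⟨f, rfl⟩ : ∃ f, fuel = f + 1 := ⟨fuel - 1, by omega⟩
    have hnil : apF 0 ft = [] := apF_nil_of_all_zero 0 (InvA_exit hInv hFin)
    have hrot : rotQ ft (A : Int) = [] := by unfold rotQ; rw [hnil]; simp
    rw [hrot, ref2_nil]
    simp [loopA, hFin]
  · have hk0 : 0 ≤ k := hInv.2.2.1
    have act : ∀ (j : Nat) (v : Int) (fu : Nat), ft[j]? = some v → v ≠ 0 →
        X + 2 ≤ fu →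
        loopA fu ft k ans (j : Int) Fin = ref2 K (rotQ ft (j : Int)) := by
      intro j v fu hj hv hfu
      have hjlt : j < ft.length := (List.getElem?_eq_some_iff.mp hj).1
      obtain ⟨f, rfl⟩ : ∃ f, fu = f + 1 := ⟨fu - 1, by omega⟩
      have hne : ¬((j : Int) = (ft.length : Int)) := by simp; omega
      simp only [loopA]
      rw [if_neg hFin, if_neg hne]
      simp only [PySem.List.pyGet?_natCast, hj]
      rw [if_neg hv]
      rcases Nat.eq_zero_or_pos K with hK0 | hKpos
      · have hkle : k ≤ 0 := by omega
        rw [if_pos hkle, if_neg hFin, hK0, rotQ_active ft j v hj hv]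
        simp [ref2]
      · have hkpos : 0 < k := by omega
        rw [if_neg (by omega : ¬ k ≤ 0)]
        rw [PySem.List.pySetD_natCast]
        have harr : ((j : Int) + 1) = (((j + 1 : Nat)) : Int) := by push_cast; ring
        rw [harr]
        have hInv' := InvA_eat hInv j v hj hv hkpos
        have hb : ((K - 1) + 1) * (2 * (ft.set j (v - 1)).length + 2) + 1 ≤ f := by
          rw [List.length_set, (by omega : K - 1 + 1 = K), ← hX]; omega
        rw [IH (K - 1) (by omega) Z (ft.set j (v - 1)) (k - 1) (((j + 1 : Nat)) : Int)
          (if v - 1 = 0 then Fin + 1 else Fin) (j + 1) f hInv'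
          (by rw [List.length_set]; omega) (by omega) hb]
        rw [← harr, rotQ_eat ft j v hj hv, rotQ_active ft j v hj hv]
        obtain ⟨K', rfl⟩ : ∃ K', K = K' + 1 := ⟨K - 1, by omega⟩
        simp [ref2]
    obtain ⟨j0, v0, hj0, hv0⟩ := InvA_live hInv hFin
    have chase2 : ∀ (c : Nat), ∀ (A2 fu : Nat), A2 + c = ft.length →
        (∃ i v, A2 ≤ i ∧ ft[i]? = some v ∧ v ≠ 0) →
        X + c + 2 ≤ fu →
        loopA fu ft k ans (A2 : Int) Fin = ref2 K (rotQ ft (A2 : Int)) := by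
      intro c
      induction c with
      | zero =>
        intro A2 fu hlen hex _hfu
        obtain ⟨i, v, hle, hi, hv⟩ := hex
        have : i < ft.length := (List.getElem?_eq_some_iff.mp hi).1
        omega
      | succ c ihc =>
        intro A2 fu hlen hex hfu
        have hA2lt : A2 < ft.length := by omega
        cases hat : ft[A2]? with
        | none =>
          have := List.getElem?_eq_none_iff.mp hat; omega
        | some w =>
          by_cases hw : w = 0
          · subst hw
            obtain ⟨f, rfl⟩ : ∃ f, fu = f + 1 := ⟨fu - 1, by omega⟩
            have hne : ¬((A2 : Int) = (ft.length : Int)) := by simp; omega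
            simp only [loopA]
            rw [if_neg hFin, if_neg hne]
            simp only [PySem.List.pyGet?_natCast, hat]
            rw [if_pos trivial]
            have harr : ((A2 : Int) + 1) = (((A2 + 1 : Nat)) : Int) := by push_cast; ring
            rw [rotQ_skip ft A2 hat, harr]
            refine ihc (A2 + 1) f (by omega) ?_ (by omega)
            obtain ⟨i, v, hle, hi, hv⟩ := hex
            have hne2 : i ≠ A2 := by
              intro hc
              rw [hc, hat] at hi
              exact hv (Option.some.inj hi).symm
            exact ⟨i, v, by omega, hi, hv⟩
          · exact act A2 w fu hat hw (by omega)
    have chase1 : ∀ (c : Nat), ∀ (A2 fu : Nat), A2 + c = ft.length →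
        X + c + ft.length + 2 ≤ fu →
        loopA fu ft k ans (A2 : Int) Fin = ref2 K (rotQ ft (A2 : Int)) := by
      intro c
      induction c with
      | zero =>
        intro A2 fu hlen hfu
        have hA2 : A2 = ft.length := by omega
        subst hA2
        obtain ⟨f, rfl⟩ : ∃ f, fu = f + 1 := ⟨fu - 1, by omega⟩
        rw [loopA_wrap, rotQ_len]
        have h2 := chase2 ft.length 0 (f + 1) (by omega)
          ⟨j0, v0, Nat.zero_le _, hj0, hv0⟩ (by omega)
        simp only [Nat.cast_zero] at h2
        rw [rotQ_zero] at h2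
        exact h2
      | succ c ihc =>
        intro A2 fu hlen hfu
        have hA2lt : A2 < ft.length := by omega
        cases hat : ft[A2]? with
        | none =>
          have := List.getElem?_eq_none_iff.mp hat; omega
        | some w =>
          by_cases hw : w = 0
          · subst hw
            obtain ⟨f, rfl⟩ : ∃ f, fu = f + 1 := ⟨fu - 1, by omega⟩
            have hne : ¬((A2 : Int) = (ft.length : Int)) := by simp; omega
            simp only [loopA]
            rw [if_neg hFin, if_neg hne]
            simp only [PySem.List.pyGet?_natCast, hat]
            rw [if_pos trivial]
            have harr : ((A2 : Int) + 1) = (((A2 + 1 : Nat)) : Int) := by push_cast; ring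
            rw [rotQ_skip ft A2 hat, harr]
            exact ihc (A2 + 1) f (by omega) (by omega)
          · exact act A2 w fu hat hw (by omega)
    exact chase1 (ft.length - A) A fuel (by omega) (by omega)

theorem solution_eq_ref (ft : List Int) (k : Int) (hpre : Pre_solution ft k) :
    solution ft k = ref2 k.toNat (apF 0 ft) := by
  obtain ⟨h2, h3⟩ := hpre
  have hInv : InvA (cz ft) ft k 0 := by
    refine ⟨by omega, le_refl _, h2, fun hZ => ?_⟩
    have hmem0 : (0 : Int) ∈ ft := by
      have hne : ft.filter (fun x => decide (x = 0)) ≠ [] := by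
        intro hc; rw [cz, hc] at hZ; simp at hZ
      obtain ⟨x, hx⟩ := List.exists_mem_of_ne_nil _ hne
      obtain ⟨hmem, hx0⟩ := List.mem_filter.mp hx
      simpa using (by simpa using hx0 : x = 0) ▸ hmem
    by_cases hall : ∀ x ∈ ft, 0 ≤ x
    · right
      by_contra hs
      exact h3 ⟨hmem0, hall, by omega⟩
    · left
      push_neg at hall
      obtain ⟨x, hx, hxneg⟩ := hall
      exact ⟨x, hx, by omega⟩
  have hmain := mainA k.toNat (cz ft) ft k 0 0 0
    (((max k 0).toNat + 1) * (2 * ft.length + 2) + 1) hInv (Nat.zero_le _) rfl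
    (by rw [max_eq_left h2])
  unfold solution
  simp only [Nat.cast_zero] at hmain
  rw [hmain, rotQ_zero]

-- ---- B side ----


-- ---- B side ----

def stepQ (l : List (Int × Int)) : List (Int × Int) := l.flatMap filt

def bulkd (c : Nat) (l : List (Int × Int)) : List (Int × Int) :=
  l.filterMap (fun p => if 0 < p.2 ∧ p.2 ≤ (c : Int) then none else some (p.1, p.2 - (c : Int)))

theorem ref2_round_aux : ∀ (l acc : List (Int × Int)) (q : Nat), l.length ≤ q →
    ref2 q (l ++ acc) = ref2 (q - l.length) (acc ++ stepQ l)
  | [], acc, q, _ => by simp [stepQ]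
  | p :: rest, acc, q, h => by
    obtain ⟨q', rfl⟩ : ∃ q', q = q' + 1 := ⟨q - 1, by simp at h; omega⟩
    have hstep : ref2 (q' + 1) ((p :: rest) ++ acc) = ref2 q' (rest ++ (acc ++ filt p)) := by
      simp [ref2, List.append_assoc]
    rw [hstep, ref2_round_aux rest (acc ++ filt p) q' (by simp at h; omega)]
    simp [stepQ, List.append_assoc]

theorem ref2_round (l : List (Int × Int)) (q : Nat) (h : l.length ≤ q) :
    ref2 q l = ref2 (q - l.length) (stepQ l) := by
  have := ref2_round_aux l [] q h
  simpa using this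

theorem stepQ_bulkd (c : Nat) (l : List (Int × Int)) (h : ∀ p ∈ l, p.2 ≠ 0) :
    stepQ (bulkd c l) = bulkd (c + 1) l := by
  induction l with
  | nil => rfl
  | cons p rest ih =>
    have hp := h p List.mem_cons_self
    have hrest := ih (fun x hx => h x (List.mem_cons_of_mem p hx))
    simp only [stepQ, bulkd] at hrest
    by_cases h1 : 0 < p.2 ∧ p.2 ≤ (c : Int)
    · simp only [stepQ, bulkd, List.filterMap_cons, if_pos h1,
        if_pos (show 0 < p.2 ∧ p.2 ≤ ((c + 1 : Nat) : Int) by push_cast; omega)]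
      exact hrest
    · by_cases h2 : p.2 = (c : Int) + 1
      · have heq : p.2 - (c : Int) - 1 = 0 := by omega
        simp only [stepQ, bulkd, List.filterMap_cons, if_neg h1, List.flatMap_cons, filt,
          if_pos heq, if_pos (show 0 < p.2 ∧ p.2 ≤ ((c + 1 : Nat) : Int) by push_cast; omega),
          List.nil_append]
        exact hrest
      · have hne : p.2 - (c : Int) - 1 ≠ 0 := by omega
        simp only [stepQ, bulkd, List.filterMap_cons, if_neg h1, List.flatMap_cons, filt,
          if_neg hne,
          if_neg (show ¬(0 < p.2 ∧ p.2 ≤ ((c + 1 : Nat) : Int)) by push_cast; omega)]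
        rw [hrest]
        have hv : p.2 - (c : Int) - 1 = p.2 - ((c + 1 : Nat) : Int) := by push_cast; ring
        rw [hv]
        simp

theorem bulkd_eq_map (c : Nat) (l : List (Int × Int)) (h : ∀ p ∈ l, p.2 < 0 ∨ (c : Int) < p.2) :
    bulkd c l = l.map (fun p => (p.1, p.2 - (c : Int))) := by
  induction l with
  | nil => rfl
  | cons p rest ih =>
    have hrest := ih (fun x hx => h x (List.mem_cons_of_mem p hx))
    simp only [bulkd, List.filterMap_cons, List.map_cons]
    rw [if_neg (by have := h p List.mem_cons_self; omega)]
    simp only [bulkd] at hrest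
    rw [hrest]

theorem ref2_bulk : ∀ (c : Nat) (q : Nat) (l : List (Int × Int)),
    (∀ p ∈ l, p.2 ≠ 0 ∧ (p.2 < 0 ∨ (c : Int) ≤ p.2)) → c * l.length ≤ q →
    ref2 q l = ref2 (q - c * l.length) (bulkd c l) := by
  intro c
  induction c with
  | zero =>
    intro q l h _
    rw [bulkd_eq_map 0 l (fun p hp => by have := h p hp; omega)]
    simp
  | succ c ihc =>
    intro q l h hq
    have hx : (c + 1) * l.length = c * l.length + l.length := by ring
    have hle : c * l.length ≤ q := by omega
    rw [ihc q l (fun p hp => ⟨(h p hp).1,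
      by have := (h p hp).2; push_cast at this ⊢; omega⟩) hle]
    have hlen : (bulkd c l).length = l.length := by
      rw [bulkd_eq_map c l (fun p hp => by have := (h p hp).2; push_cast at this ⊢; omega)]
      simp
    rw [ref2_round (bulkd c l) (q - c * l.length) (by rw [hlen]; omega)]
    rw [stepQ_bulkd c l (fun p hp => (h p hp).1), hlen]
    have harith : q - c * l.length - l.length = q - (c + 1) * l.length := by omega
    rw [harith]

theorem ref2_idx : ∀ (r : Nat) (l : List (Int × Int)) (_h : r < l.length),
    ref2 r l = (l[r]).1 + 1
  | 0, p :: _, _ => rfl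
  | r + 1, p :: rest, h => by
    have hr : r < rest.length := by simp at h; omega
    have hstep : ref2 (r + 1) (p :: rest) = ref2 r (rest ++ filt p) := by simp [ref2]
    rw [hstep, ref2_idx r (rest ++ filt p) (by simp; omega)]
    congr 1
    rw [List.getElem_append_left hr]
    simp

theorem stepQ_map_of_neg (l : List (Int × Int)) (h : ∀ p ∈ l, p.2 < 0) :
    stepQ l = l.map (fun p => (p.1, p.2 - 1)) := by
  induction l with
  | nil => rfl
  | cons p rest ih =>
    have hp := h p List.mem_cons_self
    simp only [stepQ, List.flatMap_cons, List.map_cons, filt, if_neg (by omega : ¬ p.2 - 1 = 0)]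
    rw [← stepQ, ih (fun x hx => h x (List.mem_cons_of_mem p hx))]
    rfl

theorem ref2_noexit : ∀ (K : Nat) (l : List (Int × Int)) (hnil : l ≠ []),
    (∀ p ∈ l, p.2 < 0) →
    ref2 K l = (l[K % l.length]'(Nat.mod_lt _ (List.length_pos_iff.mpr hnil))).1 + 1 := by
  intro K
  induction K using Nat.strong_induction_on with
  | _ K IH =>
  intro l hnil h
  have hpos : 0 < l.length := List.length_pos_iff.mpr hnil
  by_cases hK : K < l.length
  · rw [ref2_idx K l hK]
    congr 1
    simp [Nat.mod_eq_of_lt hK]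
  · rw [ref2_round l K (by omega), stepQ_map_of_neg l h]
    have hlm : (l.map (fun p => (p.1, p.2 - 1))).length = l.length := by simp
    have hKK : K - l.length < K := by omega
    rw [IH (K - l.length) hKK _ (by simp [hnil]) (by
      intro p hp
      obtain ⟨q, hq, rfl⟩ := List.mem_map.mp hp
      have := h q hq
      simpa using by omega)]
    have hmod : (K - l.length) % (l.map (fun p => (p.1, p.2 - 1))).length = K % l.length := by
      rw [hlm]
      conv_rhs => rw [show K = (K - l.length) + l.length by omega]
      rw [Nat.add_mod_right]
    simp only [hmod]
    rw [List.getElem_map]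

theorem ref2_small (K : Nat) (l : List (Int × Int)) (m : Int) (hm1 : 1 ≤ m)
    (hall : ∀ p ∈ l, p.2 ≠ 0 ∧ (p.2 < 0 ∨ m ≤ p.2))
    (hK : (K : Int) < m * l.length) (hlen : l ≠ []) :
    ref2 K l = (l[K % l.length]'(Nat.mod_lt _ (List.length_pos_iff.mpr hlen))).1 + 1 := by
  have hpos : 0 < l.length := List.length_pos_iff.mpr hlen
  set c := K / l.length with hc
  set r := K % l.length with hr
  have hcr : c * l.length + r = K := by
    rw [hc, hr, Nat.mul_comm]; exact Nat.div_add_mod K l.length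
  have hrlt : r < l.length := Nat.mod_lt _ hpos
  have hcm : (c : Int) < m := by
    by_contra hge
    have h1 : m * (l.length : Int) ≤ (c : Int) * l.length :=
      mul_le_mul_of_nonneg_right (by omega) (by positivity)
    have h2 : (c : Int) * l.length ≤ K := by push_cast [← hcr]; omega
    omega
  rw [ref2_bulk c K l (fun p hp => ⟨(hall p hp).1, by have := (hall p hp).2; omega⟩) (by omega)]
  have hmap := bulkd_eq_map c l (fun p hp => by have := (hall p hp).2; omega)
  have hKr : K - c * l.length = r := by omega
  rw [hKr, hmap]
  rw [ref2_idx r _ (by simpa using hrlt)]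
  rw [List.getElem_map]

theorem filter_map_eq_bulkd (l : List (Int × Int)) (m : Int) (hm1 : 1 ≤ m)
    (h : ∀ p ∈ l, p.2 ≠ 0 ∧ (p.2 < 0 ∨ m ≤ p.2)) :
    (l.filter (fun p => decide (p.2 ≠ m))).map (fun p => (p.1, p.2 - m)) =
      bulkd m.toNat l := by
  have hmc : ((m.toNat : Nat) : Int) = m := Int.toNat_of_nonneg (by omega)
  induction l with
  | nil => rfl
  | cons p rest ih =>
    have hp := h p List.mem_cons_self
    have hrest := ih (fun x hx => h x (List.mem_cons_of_mem p hx))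
    simp only [bulkd, List.filterMap_cons, List.filter_cons, hmc] at hrest ⊢
    by_cases hpm : p.2 = m
    · simp only [if_pos (show 0 < p.2 ∧ p.2 ≤ m from by omega),
        if_neg (show ¬(decide (p.2 ≠ m) = true) from by simp [hpm])]
      exact hrest
    · simp only [if_neg (show ¬(0 < p.2 ∧ p.2 ≤ m) from by
          have h1 := hp.1; have h2 := hp.2; omega),
        if_pos (show decide (p.2 ≠ m) = true from by simp [hpm])]
      simp only [List.map_cons]
      rw [hrest]

theorem postIdx_eval (l : List (Int × Int)) (k : Int) (hnil : l ≠ []) (hk : 0 ≤ k) :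
    postIdx l k =
      (l[k.toNat % l.length]'(Nat.mod_lt _ (List.length_pos_iff.mpr hnil))).1 + 1 := by
  have hpos : 0 < l.length := List.length_pos_iff.mpr hnil
  have hmod : PySem.Int.mod k (l.length : Int) = ((k.toNat % l.length : Nat) : Int) := by
    rw [show k = ((k.toNat : Nat) : Int) from (Int.toNat_of_nonneg hk).symm]
    exact PySem.Int.mod_natCast _ _
  have hr : k.toNat % l.length < l.length := Nat.mod_lt _ hpos
  rw [postIdx, if_neg hnil, hmod]
  simp only [PySem.List.pyGet?_natCast, List.getElem?_eq_getElem hr]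

theorem altLoop_ref : ∀ (n : Nat) (l : List (Int × Int)) (k : Int), l.length ≤ n →
    (∀ p ∈ l, p.2 ≠ 0) → 0 ≤ k →
    postIdx (altLoop l k).1 (altLoop l k).2 = ref2 k.toNat l := by
  intro n
  induction n with
  | zero =>
    intro l k hl h hk
    have : l = [] := List.eq_nil_of_length_eq_zero (by omega)
    subst this
    simp [altLoop, postIdx, ref2_nil]
  | succ n ihn =>
    intro l k hl h hk
    by_cases hnil : l = []
    · subst hnil
      simp [altLoop, postIdx, ref2_nil]
    · have hlpos : 0 < l.length := List.length_pos_iff.mpr hnil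
      rw [altLoop, dif_neg hnil]
      by_cases hposnil : (l.map Prod.snd).filter (fun t => decide (0 < t)) = []
      · rw [dif_pos hposnil]
        show postIdx l k = _
        have hneg : ∀ p ∈ l, p.2 < 0 := by
          intro p hp
          have h1 := h p hp
          have h2 := List.filter_eq_nil_iff.mp hposnil p.2 (List.mem_map_of_mem hp)
          simp at h2
          omega
        rw [ref2_noexit k.toNat l hnil hneg]
        exact postIdx_eval l k hnil hk
      · rw [dif_neg hposnil]
        split
        · rename_i h'
          exact absurd ((PySem.List.min?_eq_none_iff _ _).mp h') hposnil
        rename_i m hm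
        have hmp := PySem.List.min?_mem hm
        have hm1 : 1 ≤ m := by
          have := List.of_mem_filter hmp
          simp at this
          omega
        have hmin : ∀ p ∈ l, 0 < p.2 → m ≤ p.2 := by
          intro p hp hpos2
          exact PySem.List.min?_isMin hm p.2
            (List.mem_filter.mpr ⟨List.mem_map_of_mem hp, by simpa using hpos2⟩)
        have hall : ∀ p ∈ l, p.2 ≠ 0 ∧ (p.2 < 0 ∨ m ≤ p.2) := by
          intro p hp
          have h1 := h p hp
          refine ⟨h1, ?_⟩
          by_cases hs : 0 < p.2
          · exact Or.inr (hmin p hp hs)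
          · exact Or.inl (by omega)
        by_cases hcase : k < m * (l.length : Int)
        · rw [if_pos hcase]
          show postIdx l k = _
          rw [ref2_small k.toNat l m hm1 hall
            (by rw [Int.toNat_of_nonneg hk]; exact hcase) hnil]
          exact postIdx_eval l k hnil hk
        · rw [if_neg hcase]
          have hknew : 0 ≤ k - m * (l.length : Int) := by omega
          have hlt : ((l.filter (fun p => decide (p.2 ≠ m))).map
              (fun p => (p.1, p.2 - m))).length < l.length := by
            simp only [List.length_map]
            obtain ⟨p0, hp0, hp0m⟩ := List.mem_map.mp (List.mem_of_mem_filter hmp)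
            exact List.length_filter_lt_length_iff_exists.mpr ⟨p0, hp0, by simp [hp0m]⟩
          have hsub : ∀ p ∈ (l.filter (fun p => decide (p.2 ≠ m))).map
              (fun p => (p.1, p.2 - m)), p.2 ≠ 0 := by
            intro p hp
            obtain ⟨q, hq, rfl⟩ := List.mem_map.mp hp
            have hq1 := hall q (List.mem_of_mem_filter hq)
            have hq2 := List.of_mem_filter hq
            simp at hq2 ⊢
            omega
          rw [ihn _ (k - m * (l.length : Int)) (by omega) hsub hknew]
          rw [filter_map_eq_bulkd l m hm1 hall]
          have ht : m * (l.length : Int) = ((m.toNat * l.length : Nat) : Int) := by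
            push_cast
            rw [Int.toNat_of_nonneg (by omega : (0:Int) ≤ m)]
          have htn : (k - m * (l.length : Int)).toNat = k.toNat - m.toNat * l.length := by
            rw [ht] at hknew ⊢
            omega
          rw [htn, ref2_bulk m.toNat k.toNat l
            (fun p hp => ⟨(hall p hp).1, by
              have := (hall p hp).2
              rw [Int.toNat_of_nonneg (by omega : (0:Int) ≤ m)]
              exact this⟩)
            (by rw [ht] at hcase; omega)]

theorem enumerate_filter_apF : ∀ (ft : List Int) (s : Int),
    (PySem.List.enumerate ft s).filter (fun p => decide (p.2 ≠ 0)) = apF s ft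
  | [], s => by simp [PySem.List.enumerate_nil, apF]
  | v :: r, s => by
    rw [PySem.List.enumerate_cons, List.filter_cons]
    by_cases hv : v = 0 <;> simp [apF, hv] <;>
      simpa using enumerate_filter_apF r (s + 1)

theorem alt_eq_ref (ft : List Int) (k : Int) (hpre : Pre_solution ft k) :
    solution_alt ft k = ref2 k.toNat (apF 0 ft) := by
  obtain ⟨h2, -⟩ := hpre
  unfold solution_alt
  rw [enumerate_filter_apF]
  have halt := altLoop_ref (apF 0 ft).length (apF 0 ft) k (le_refl _)
    (fun p hp => apF_snd_ne hp) h2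
  rcases hpair : altLoop (apF 0 ft) k with ⟨a, b⟩
  rw [hpair] at halt
  exact halt

-- ===== VERDICT (by name: the statement is the Claim_ definition above) =====
theorem solution_spec : Claim_equal_solution := by
  intro ft k _hdom hpre
  unfold Spec_solution
  rw [solution_eq_ref ft k hpre, alt_eq_ref ft k hpre]
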